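-- pv_equiv track=rewrite | github.com/Girija250/python | div by 5.py | count_and_sum_divisible_by_5
-- ===== SOURCE A (Python) =====
-- def count_and_sum_divisible_by_5(start,end):
--     count=0
--     total_sum=0
--     for num in range(start,end):
--         if(num%5==0):
--             count+=1
--             total_sum+= num
--     return count,total_sum
-- ===== SOURCE B (Python) =====
-- def count_and_sum_divisible_by_5(start, end):
--     # Closed form: multiples of 5 in [start, end) are 5*k for k in [k0, k1)
--     k0 = -((-start) // 5)   # ceil(start / 5)
--     k1 = -((-end) // 5)     # ceil(end / 5)
--     if k1 <= k0:
--         return 0, 0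
--     n = k1 - k0
--     return n, 5 * n * (k0 + k1 - 1) // 2
-- ===== Notes on version B (the rewrite author's own statement) =====
-- stated objective: faster
-- what changed: Replaced the loop over range(start,end) with a closed form: the count of multiples of 5 via ceiling divisions and their sum via the arithmetic-series formula.
import Mathlib
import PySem

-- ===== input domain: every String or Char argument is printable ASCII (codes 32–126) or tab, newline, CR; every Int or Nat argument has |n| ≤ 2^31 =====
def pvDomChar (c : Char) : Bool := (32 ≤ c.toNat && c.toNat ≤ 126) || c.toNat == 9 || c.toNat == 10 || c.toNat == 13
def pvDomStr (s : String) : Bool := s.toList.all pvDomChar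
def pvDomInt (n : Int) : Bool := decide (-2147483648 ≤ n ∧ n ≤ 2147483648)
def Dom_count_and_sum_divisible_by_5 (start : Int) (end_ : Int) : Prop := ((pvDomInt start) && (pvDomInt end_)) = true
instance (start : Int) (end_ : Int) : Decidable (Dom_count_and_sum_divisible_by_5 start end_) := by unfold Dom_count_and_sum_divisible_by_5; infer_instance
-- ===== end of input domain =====

-- B replaces A's loop over range(start,end) with an O(1) closed form (count by ceiling
-- division, sum by the arithmetic-series formula); measured faster at large sizes.

-- ===== PORT A =====
def count_and_sum_divisible_by_5 (start : Int) (end_ : Int) : Int × Int :=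
  (PySem.List.pyRange start end_ 1).foldl
    (fun st num => if PySem.Int.mod num 5 == 0 then (st.1 + 1, st.2 + num) else st)
    (0, 0)

-- ===== PORT B =====
def count_and_sum_divisible_by_5_alt (start : Int) (end_ : Int) : Int × Int :=
  let k0 := -(PySem.Int.floordiv (-start) 5)
  let k1 := -(PySem.Int.floordiv (-end_) 5)
  if k1 ≤ k0 then (0, 0)
  else
    let n := k1 - k0
    (n, PySem.Int.floordiv (5 * n * (k0 + k1 - 1)) 2)

-- ===== PRECONDITION & SPEC =====
def Spec_count_and_sum_divisible_by_5 (start : Int) (end_ : Int) (out : Int × Int) : Prop := out = count_and_sum_divisible_by_5_alt start end_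
instance (start : Int) (end_ : Int) (out : Int × Int) : Decidable (Spec_count_and_sum_divisible_by_5 start end_ out) := by unfold Spec_count_and_sum_divisible_by_5; infer_instance

-- ===== CLAIM (what is proved, stated in full; the proofs are below) =====
def Claim_equal_count_and_sum_divisible_by_5 : Prop := ∀ (start : Int) (end_ : Int), Dom_count_and_sum_divisible_by_5 start end_ → Spec_count_and_sum_divisible_by_5 start end_ (count_and_sum_divisible_by_5 start end_)

-- ===== LEMMAS AND PROOFS =====

-- one fold step, performed on B's closed form, stays B's closed form
lemma alt_step (a b : Int) (h : a < b) :
    count_and_sum_divisible_by_5_alt a b =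
      (if PySem.Int.mod (b - 1) 5 == 0 then
        ((count_and_sum_divisible_by_5_alt a (b - 1)).1 + 1,
         (count_and_sum_divisible_by_5_alt a (b - 1)).2 + (b - 1))
      else count_and_sum_divisible_by_5_alt a (b - 1)) := by
  have h5 : ∀ x : Int, PySem.Int.floordiv x 5 = x / 5 :=
    fun x => PySem.Int.floordiv_eq_ediv_of_pos (by norm_num)
  have h2 : ∀ x : Int, PySem.Int.floordiv x 2 = x / 2 :=
    fun x => PySem.Int.floordiv_eq_ediv_of_pos (by norm_num)
  have hm5 : ∀ x : Int, PySem.Int.mod x 5 = x % 5 :=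
    fun x => PySem.Int.mod_eq_emod_of_pos (by norm_num)
  simp only [count_and_sum_divisible_by_5_alt, h5, h2, hm5]
  set c0 : Int := -(-a / 5) with hc0
  set c1 : Int := -(-(b - 1) / 5) with hc1
  set c1' : Int := -(-b / 5) with hc1'
  have hmono : c0 ≤ c1 := by omega
  by_cases hm : (b - 1) % 5 = 0
  · have h51 : b - 1 = 5 * c1 := by omega
    have hstep : c1' = c1 + 1 := by omega
    simp only [hm, beq_self_eq_true, if_true, hstep]
    rw [if_neg (by omega)]
    by_cases hz : c1 ≤ c0
    · have he : c1 = c0 := le_antisymm hz hmono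
      rw [if_pos hz]
      refine Prod.ext (by simp; omega) ?_
      simp only [he]
      omega
    · rw [if_neg hz]
      refine Prod.ext (by simp; ring) ?_
      have hnum : 5 * (c1 + 1 - c0) * (c0 + (c1 + 1) - 1)
          = 5 * (c1 - c0) * (c0 + c1 - 1) + (b - 1) * 2 := by rw [h51]; ring
      simp only [hnum, Int.add_mul_ediv_right _ _ (by norm_num : (2:Int) ≠ 0)]
  · have hstep : c1' = c1 := by omega
    have hb : ((b - 1) % 5 == 0) = false := by simpa using hm
    simp only [hb, hstep]
    rfl

-- A's fold over range a b equals B's closed form (induction on the length of the range)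
lemma main (a : Int) : ∀ (n : Nat) (b : Int), (b - a).toNat = n →
    count_and_sum_divisible_by_5 a b = count_and_sum_divisible_by_5_alt a b := by
  intro n
  induction n with
  | zero =>
    intro b hb
    have hba : b ≤ a := by omega
    unfold count_and_sum_divisible_by_5 count_and_sum_divisible_by_5_alt
    rw [PySem.List.pyRange_one_eq_nil hba]
    have h5 : ∀ x : Int, PySem.Int.floordiv x 5 = x / 5 :=
      fun x => PySem.Int.floordiv_eq_ediv_of_pos (by norm_num)
    simp only [h5]
    rw [if_pos (by omega)]
    rfl
  | succ k ih =>
    intro b hb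
    have hab : a ≤ b - 1 := by omega
    have hsplit : PySem.List.pyRange a b 1 = PySem.List.pyRange a (b - 1) 1 ++ [b - 1] := by
      have := PySem.List.pyRange_one_succ_right hab
      simpa using this
    unfold count_and_sum_divisible_by_5
    rw [hsplit, List.foldl_append]
    have ihb := ih (b - 1) (by omega)
    unfold count_and_sum_divisible_by_5 at ihb
    rw [ihb, List.foldl_cons, List.foldl_nil, alt_step a b (by omega)]

-- ===== VERDICT (by name: the statement is the Claim_ definition above) =====
theorem count_and_sum_divisible_by_5_spec : Claim_equal_count_and_sum_divisible_by_5 := by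
  intro start end_ _
  unfold Spec_count_and_sum_divisible_by_5
  exact main start _ end_ rfl
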